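-- pv_equiv track=rewrite | github.com/sunshine0677/KMOR | Kpurn_search.py | remove_unnecessary_repeats
-- ===== SOURCE A (Python) =====
-- from typing import Dict, List, Tuple, Iterable, Optional, Any, Set
--
-- def remove_unnecessary_repeats(path: List[str]) -> List[str]:
--     """移除不必要的重复节点"""
--     if len(path) <= 2:
--         return path
--
--     cleaned = [path[0]]
--     for i in range(1, len(path)):
--         # 避免 A -> B -> A 模式
--         if i < len(path) - 1 and path[i - 1] == path[i + 1]:
--             continue
--         # 避免连续重复
--         if path[i] != cleaned[-1]:
--             cleaned.append(path[i])
--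
--     return cleaned
-- ===== SOURCE B (Python) =====
-- from typing import List
--
-- def remove_unnecessary_repeats(path: List[str]) -> List[str]:
--     """Remove A->B->A detours, then collapse consecutive duplicates (two passes)."""
--     n = len(path)
--     if n <= 2:
--         return path
--     # pass 1: drop elements that sit in an A -> B -> A pattern (by original indices)
--     filtered = [path[0]] + [path[i] for i in range(1, n)
--                             if not (i < n - 1 and path[i - 1] == path[i + 1])]
--     # pass 2: collapse consecutive duplicates
--     out: List[str] = []
--     for x in filtered:
--         if not out or out[-1] != x:
--             out.append(x)
--     return out
-- ===== Notes on version B (the rewrite author's own statement) =====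
-- stated objective: alternative
-- what changed: A's single interleaved index loop is split into two sequential passes: a comprehension that drops A->B->A middles by original indices, then a separate consecutive-duplicate collapse fold.
import Mathlib
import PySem

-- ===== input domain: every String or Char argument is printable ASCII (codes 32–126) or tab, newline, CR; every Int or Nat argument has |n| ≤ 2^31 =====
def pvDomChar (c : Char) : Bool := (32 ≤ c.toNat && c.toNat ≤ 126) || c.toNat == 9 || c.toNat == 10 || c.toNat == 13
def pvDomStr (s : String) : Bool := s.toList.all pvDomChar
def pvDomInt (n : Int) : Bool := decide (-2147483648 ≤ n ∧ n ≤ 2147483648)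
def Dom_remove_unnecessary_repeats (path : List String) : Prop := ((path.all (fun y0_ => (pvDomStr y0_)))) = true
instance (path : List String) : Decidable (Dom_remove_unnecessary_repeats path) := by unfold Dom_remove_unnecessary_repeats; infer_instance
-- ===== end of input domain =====

-- B change: A's single interleaved loop is split into two sequential passes (A->B->A filter, then consecutive-duplicate collapse); same cost, alternative decomposition.
-- ===== PORT A =====
-- shared indexing helper: path[i] (always used in range here, so the default is never taken)
def pvGetS (xs : List String) (i : Int) : String := (PySem.List.pyGet? xs i).getD ""

def pvStepA (path : List String) (n : Int) (cleaned : List String) (i : Int) : List String :=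
  if i < n - 1 ∧ pvGetS path (i - 1) = pvGetS path (i + 1) then cleaned
  else if pvGetS path i ≠ pvGetS cleaned (-1) then cleaned ++ [pvGetS path i] else cleaned

def remove_unnecessary_repeats (path : List String) : List String :=
  let n : Int := path.length
  if n ≤ 2 then path
  else (PySem.List.pyRange 1 n).foldl (pvStepA path n) [pvGetS path 0]

-- ===== PORT B =====
def pvCollapseStep (out : List String) (x : String) : List String :=
  if out = [] ∨ pvGetS out (-1) ≠ x then out ++ [x] else out

def remove_unnecessary_repeats_alt (path : List String) : List String :=
  let n : Int := path.length
  if n ≤ 2 then path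
  else
    let filtered := pvGetS path 0 ::
      (PySem.List.pyRange 1 n).filterMap (fun i =>
        if i < n - 1 ∧ pvGetS path (i - 1) = pvGetS path (i + 1) then none
        else some (pvGetS path i))
    filtered.foldl pvCollapseStep []

-- ===== PRECONDITION & SPEC =====
def Spec_remove_unnecessary_repeats (path : List String) (out : List String) : Prop := out = remove_unnecessary_repeats_alt path
instance (path : List String) (out : List String) : Decidable (Spec_remove_unnecessary_repeats path out) := by unfold Spec_remove_unnecessary_repeats; infer_instance

-- ===== CLAIM (what is proved, stated in full; the proofs are below) =====
def Claim_equal_remove_unnecessary_repeats : Prop := ∀ (path : List String), Dom_remove_unnecessary_repeats path → Spec_remove_unnecessary_repeats path (remove_unnecessary_repeats path)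

-- ===== LEMMAS AND PROOFS =====

lemma pvStepA_eq_collapse (path : List String) (n : Int) (acc : List String) (i : Int)
    (h : acc ≠ []) (hs : ¬ (i < n - 1 ∧ pvGetS path (i - 1) = pvGetS path (i + 1))) :
    pvStepA path n acc i = pvCollapseStep acc (pvGetS path i) := by
  unfold pvStepA pvCollapseStep
  rw [if_neg hs]
  by_cases hx : pvGetS path i = pvGetS acc (-1)
  · rw [if_neg (by simp [hx]), if_neg (by simp [h, hx.symm])]
  · rw [if_pos hx, if_pos (Or.inr (fun hc => hx hc.symm))]

lemma pvCollapseStep_ne_nil (acc : List String) (x : String) (h : acc ≠ []) :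
    pvCollapseStep acc x ≠ [] := by
  unfold pvCollapseStep; split <;> simp [h]

lemma loop_eq_two_pass (path : List String) (n : Int) :
    ∀ (L : List Int) (acc : List String), acc ≠ [] →
      L.foldl (pvStepA path n) acc =
      (L.filterMap (fun i =>
        if i < n - 1 ∧ pvGetS path (i - 1) = pvGetS path (i + 1) then none
        else some (pvGetS path i))).foldl pvCollapseStep acc := by
  intro L
  induction L with
  | nil => intro acc _; rfl
  | cons i L ih =>
    intro acc hacc
    by_cases hs : i < n - 1 ∧ pvGetS path (i - 1) = pvGetS path (i + 1)
    · simp only [List.foldl_cons, List.filterMap_cons, if_pos hs, pvStepA]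
      exact ih acc hacc
    · simp only [List.foldl_cons, List.filterMap_cons, if_neg hs]
      rw [pvStepA_eq_collapse path n acc i hacc hs]
      have : pvCollapseStep acc (pvGetS path i) ≠ [] := pvCollapseStep_ne_nil acc _ hacc
      simpa using ih _ this

-- ===== VERDICT (by name: the statement is the Claim_ definition above) =====
theorem remove_unnecessary_repeats_spec : Claim_equal_remove_unnecessary_repeats := by
  intro path _
  unfold Spec_remove_unnecessary_repeats remove_unnecessary_repeats remove_unnecessary_repeats_alt
  by_cases hn : (path.length : Int) ≤ 2
  · simp [hn]
  · simp only [if_neg hn]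
    rw [loop_eq_two_pass path (path.length : Int) _ [pvGetS path 0] (by simp)]
    simp [pvCollapseStep]
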